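-- pv_equiv track=rewrite | github.com/hakloev/ntnu | itgk/Diverse/eksamensforelesning/dicts.py | usesAWordMoreThanOnce
-- ===== SOURCE A (Python) =====
-- def cleanWord(originalWord):
-- 	word = ""
-- 	for letter in originalWord.lower():
-- 		if letter.isalpha():
-- 			word += letter
-- 	return word
--
-- def usesAWordMoreThanOnce(text):
-- 	words = text.split()
-- 	uniqueWords = set()
-- 	for originalWord in words:
-- 		word = cleanWord(originalWord)
-- 		if word in uniqueWords:
-- 			return True
-- 		uniqueWords.add(word)
-- 	return False
-- ===== SOURCE B (Python) =====
-- def cleanWord(originalWord):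
--     return ''.join(c for c in originalWord.lower() if c.isalpha())
--
-- def usesAWordMoreThanOnce(text):
--     cleaned = sorted(cleanWord(w) for w in text.split())
--     return any(a == b for a, b in zip(cleaned, cleaned[1:]))
-- ===== Notes on version B (the rewrite author's own statement) =====
-- stated objective: alternative
-- what changed: B uses no set at all: it sorts the cleaned words and detects a repeat by scanning for an equal adjacent pair in the sorted list, instead of A's incremental set-membership loop with early return.
import Mathlib
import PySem

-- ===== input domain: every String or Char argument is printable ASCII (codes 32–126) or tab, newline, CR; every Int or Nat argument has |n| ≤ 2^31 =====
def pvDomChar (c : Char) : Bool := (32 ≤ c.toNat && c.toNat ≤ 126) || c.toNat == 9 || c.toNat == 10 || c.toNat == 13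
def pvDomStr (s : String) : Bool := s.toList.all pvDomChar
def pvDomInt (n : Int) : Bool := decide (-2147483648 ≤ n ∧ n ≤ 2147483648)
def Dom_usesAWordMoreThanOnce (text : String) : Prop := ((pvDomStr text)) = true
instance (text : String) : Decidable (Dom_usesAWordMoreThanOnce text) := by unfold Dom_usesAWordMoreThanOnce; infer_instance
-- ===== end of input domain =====

-- B uses no set: it sorts the cleaned words and scans for an equal adjacent pair,
-- replacing A's incremental set-membership loop with early return (objective: alternative).

-- ===== PORT A =====
-- A's cleanWord: accumulate the alphabetic letters of the lowered word one by one
-- (string concatenation ported as List Char accumulation, String.mk at the end — exact).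
def cleanWordA (originalWord : String) : String :=
  String.mk ((PySem.Str.lower originalWord).toList.foldl
    (fun word letter => if PySem.Chars.isalpha letter then word ++ [letter] else word) [])

-- A's loop over the words: early return True on a seen cleaned word.
def loopA : List String → PySem.Set String → Bool
  | [], _ => false
  | originalWord :: rest, uniqueWords =>
    let word := cleanWordA originalWord
    if PySem.Set.contains uniqueWords word then true
    else loopA rest (PySem.Set.add uniqueWords word)

def usesAWordMoreThanOnce (text : String) : Bool :=
  loopA (PySem.Str.split₀ text) PySem.Set.empty

-- ===== PORT B =====
def cleanWordB (originalWord : String) : String :=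
  String.mk ((PySem.Str.lower originalWord).toList.filter (fun c => PySem.Chars.isalpha c))

def usesAWordMoreThanOnce_alt (text : String) : Bool :=
  let cleaned := PySem.List.sorted ((PySem.Str.split₀ text).map cleanWordB) (fun x => x) false
  (cleaned.zip (PySem.List.slice cleaned (some 1) none)).any (fun p => p.1 == p.2)

-- ===== PRECONDITION & SPEC =====
def Spec_usesAWordMoreThanOnce (text : String) (out : Bool) : Prop := out = usesAWordMoreThanOnce_alt text
instance (text : String) (out : Bool) : Decidable (Spec_usesAWordMoreThanOnce text out) := by unfold Spec_usesAWordMoreThanOnce; infer_instance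

-- ===== CLAIM (what is proved, stated in full; the proofs are below) =====
def Claim_equal_usesAWordMoreThanOnce : Prop := ∀ (text : String), Dom_usesAWordMoreThanOnce text → Spec_usesAWordMoreThanOnce text (usesAWordMoreThanOnce text)

-- ===== LEMMAS AND PROOFS =====

theorem cleanWordA_eq (w : String) : cleanWordA w = cleanWordB w := by
  simp [cleanWordA, cleanWordB, PySem.List.foldl_append_if_eq_filter]

theorem contains_false {s : PySem.Set String} {x : String} (h : x ∉ s) :
    PySem.Set.contains s x = false := by
  cases hcc : PySem.Set.contains s x
  · rfl
  · exact absurd ((PySem.Set.contains_iff s x).mp hcc) h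

-- A's scan returns true iff the cleaned words (plus the starting set) are not all distinct.
theorem loopA_eq (ws : List String) (s : PySem.Set String) :
    loopA ws s = !decide ((ws.map cleanWordA).Nodup ∧ ∀ x ∈ ws.map cleanWordA, x ∉ s) := by
  induction ws generalizing s with
  | nil => simp [loopA]
  | cons w rest ih =>
    simp only [loopA]
    by_cases h : cleanWordA w ∈ s
    · have : PySem.Set.contains s (cleanWordA w) = true := (PySem.Set.contains_iff s _).mpr h
      simp_all
    · rw [contains_false h]
      simp only [if_neg Bool.false_ne_true, ih]
      congr 1
      simp only [decide_eq_decide, List.map_cons, List.nodup_cons, List.mem_cons,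
        PySem.Set.mem_add]
      constructor
      · intro hh
        aesop
      · intro hh
        aesop

-- In a ≤-sorted list, some adjacent pair is equal iff the list has a duplicate.
theorem adj_eq_iff_not_nodup (ys : List String) (hs : ys.Pairwise (· ≤ ·)) :
    (ys.zip ys.tail).any (fun p => p.1 == p.2) = !decide ys.Nodup := by
  induction ys with
  | nil => simp
  | cons a rest ih =>
    cases rest with
    | nil => simp
    | cons b r =>
      have hpr : (b :: r).Pairwise (· ≤ ·) := hs.tail
      by_cases hab : a = b
      · subst hab
        simp [List.zip]
      · have hanot : a ∉ b :: r := by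
          intro hmem
          rcases List.mem_cons.mp hmem with rfl | hr
          · exact hab rfl
          · have h1 : a ≤ b := (List.pairwise_cons.mp hs).1 b (List.mem_cons_self ..)
            have h2 : b ≤ a := (List.pairwise_cons.mp hpr).1 a hr
            exact hab (le_antisymm h1 h2)
        have := ih hpr
        simp only [List.zip, List.tail] at this ⊢
        simp [List.zipWith, hab, this, List.nodup_cons, hanot]

-- ===== VERDICT (by name: the statement is the Claim_ definition above) =====
theorem usesAWordMoreThanOnce_spec : Claim_equal_usesAWordMoreThanOnce := by
  intro text _
  show usesAWordMoreThanOnce text = usesAWordMoreThanOnce_alt text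
  simp only [usesAWordMoreThanOnce, usesAWordMoreThanOnce_alt]
  rw [loopA_eq, PySem.List.slice_from_one]
  set cleaned := (PySem.Str.split₀ text).map cleanWordB with hc
  rw [List.map_congr_left (fun w _ => cleanWordA_eq w), ← hc]
  set ys := PySem.List.sorted cleaned (fun x => x) false with hy
  have hperm : ys.Perm cleaned := PySem.List.sorted_perm ..
  rw [adj_eq_iff_not_nodup ys (by simpa using PySem.List.sorted_pairwise cleaned (fun x => x))]
  simp [hperm.nodup_iff, PySem.Set.empty]
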